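-- pv_equiv track=rewrite | github.com/PROG1700-Fall2024/a3-p1-timesheet-Joe7700487 | A3-P1-Timesheet.py | getMaxDays
-- ===== SOURCE A (Python) =====
-- def getMaxDays(day):
--     # get the maximum value in the list
--     maxHours = max(day)
--     # declare output
--     output = ""
--     # check if the highest hour appears just once
--     if day.count(maxHours) == 1:
--         # if highest hour only appears once, output the one index
--         output = str(day.index(max(day)) + 1)
--         return "Day {0} where you worked {1} hours.".format(output, maxHours)
--     else:
--         # if highest hour appears more than once cycle through each item in the list
--         for i in range(len(day)):
--             # check if list item is equal to the highest hour
--             if day[i] == maxHours: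
--                 # add index to the output string
--                 output = output + str(i + 1) + ", "
--         # return the final string
--         return "Days {0} where you worked {1} hours each.".format(output, maxHours)
-- ===== SOURCE B (Python) =====
-- def getMaxDays(day):
--     # single left-to-right pass maintaining the running maximum and its 1-based positions:
--     # a strictly larger hour resets the position list, an equal hour extends it.
--     best = day[0]
--     idxs = [1]
--     for i, h in enumerate(day[1:], 2):
--         if h > best:
--             best = h
--             idxs = [i]
--         elif h == best:
--             idxs.append(i)
--     if len(idxs) == 1:
--         return "Day {0} where you worked {1} hours.".format(idxs[0], best)
--     output = "".join(str(n) + ", " for n in idxs)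
--     return "Days {0} where you worked {1} hours each.".format(output, best)
-- ===== Notes on version B (the rewrite author's own statement) =====
-- stated objective: faster
-- what changed: B makes a single left-to-right pass maintaining the running maximum together with its 1-based position list (reset on a strictly larger hour, extend on an equal one), replacing A's staged max()/count()/index()/range-loop scans, and builds the plural string by join instead of A's quadratic repeated concatenation.
import Mathlib
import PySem

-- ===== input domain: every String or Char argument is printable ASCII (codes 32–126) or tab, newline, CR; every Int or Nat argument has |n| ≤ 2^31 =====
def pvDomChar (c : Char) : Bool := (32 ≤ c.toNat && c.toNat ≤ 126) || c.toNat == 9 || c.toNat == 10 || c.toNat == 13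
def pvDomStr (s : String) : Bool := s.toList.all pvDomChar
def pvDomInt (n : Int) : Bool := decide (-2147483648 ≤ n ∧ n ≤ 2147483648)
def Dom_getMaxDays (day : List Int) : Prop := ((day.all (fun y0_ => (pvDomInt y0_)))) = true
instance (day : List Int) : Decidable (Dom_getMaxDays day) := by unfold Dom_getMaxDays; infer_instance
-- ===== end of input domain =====

-- B replaces A's staged max()/count()/index()/range-loop scans by ONE left-to-right pass
-- maintaining the running maximum and its 1-based position list (reset on a strictly larger
-- hour, extend on an equal one), and builds the plural output with join; same return value
-- on every non-empty list.

-- ===== PORT A =====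
def getMaxDays (day : List Int) : String :=
  match PySem.List.max? day (fun x => x) with
  | none => ""   -- Python raises ValueError here; excluded by Pre_
  | some maxHours =>
    if PySem.List.count day maxHours == 1 then
      let output := PySem.Int.toStr (((PySem.List.index? day maxHours).getD 0 : Int) + 1)
      "Day " ++ output ++ " where you worked " ++ PySem.Int.toStr maxHours ++ " hours."
    else
      let output := (PySem.List.pyRange 0 (PySem.List.len day) 1).foldl
        (fun out i =>
          if PySem.List.pyGetD day i 0 == maxHours then
            out ++ PySem.Int.toStr (i + 1) ++ ", "
          else out) ""
      "Days " ++ output ++ " where you worked " ++ PySem.Int.toStr maxHours ++ " hours each."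

-- ===== PORT B =====
-- the loop body of Source B's single pass: state = (best, idxs)
def pvStep (st : Int × List Int) (p : Int × Int) : Int × List Int :=
  if st.1 < p.2 then (p.2, [p.1])
  else if p.2 == st.1 then (st.1, st.2 ++ [p.1])
  else st

def getMaxDays_alt (day : List Int) : String :=
  match day with
  | [] => ""   -- Source B's day[0] raises IndexError here; excluded by Pre_
  | x :: t =>   -- t = day[1:]
    let st := (PySem.List.enumerate t 2).foldl pvStep (x, [1])
    if st.2.length == 1 then
      "Day " ++ PySem.Int.toStr (st.2.headD 0) ++ " where you worked " ++
        PySem.Int.toStr st.1 ++ " hours."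
    else
      "Days " ++ PySem.Str.join "" (st.2.map (fun n => PySem.Int.toStr n ++ ", ")) ++
        " where you worked " ++ PySem.Int.toStr st.1 ++ " hours each."

-- ===== PRECONDITION & SPEC =====
-- Pre_ excludes only the empty list, on which A raises ValueError (max of empty) and B raises IndexError.
def Pre_getMaxDays (day : List Int) : Prop := day ≠ []
instance (day : List Int) : Decidable (Pre_getMaxDays day) := by unfold Pre_getMaxDays; infer_instance
def pvWitness_getMaxDays : List Int := [3, 7, 7, 2]

def Spec_getMaxDays (day : List Int) (out : String) : Prop := out = getMaxDays_alt day
instance (day : List Int) (out : String) : Decidable (Spec_getMaxDays day out) := by unfold Spec_getMaxDays; infer_instance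

-- ===== CLAIM (what is proved, stated in full; the proofs are below) =====
def Claim_equal_getMaxDays : Prop := ∀ (day : List Int), Dom_getMaxDays day → Pre_getMaxDays day → Spec_getMaxDays day (getMaxDays day)

-- ===== LEMMAS AND PROOFS =====

-- the 1-based indices of the occurrences of m, enumerate starting at s (positions reported as index+1)
def pvIdxs (day : List Int) (m s : Int) : List Int :=
  (PySem.List.enumerate day s).filterMap (fun p => if p.2 == m then some (p.1 + 1) else none)

-- same positions, but enumerate already carries the 1-based value (Source B's enumerate(day[1:], 2))
def pvIdxs2 (day : List Int) (m s : Int) : List Int :=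
  (PySem.List.enumerate day s).filterMap (fun p => if p.2 == m then some p.1 else none)

theorem pvIdxs_cons (x : Int) (t : List Int) (m s : Int) :
    pvIdxs (x :: t) m s =
      (if x = m then [s + 1] else []) ++ pvIdxs t m (s + 1) := by
  simp [pvIdxs, PySem.List.enumerate_cons, List.filterMap_cons]
  split_ifs with h <;> simp

theorem pvIdxs2_cons (x : Int) (t : List Int) (m s : Int) :
    pvIdxs2 (x :: t) m s =
      (if x = m then [s] else []) ++ pvIdxs2 t m (s + 1) := by
  simp [pvIdxs2, PySem.List.enumerate_cons, List.filterMap_cons]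
  split_ifs with h <;> simp

theorem pvIdxs2_shift (t : List Int) (m s : Int) :
    pvIdxs2 t m (s + 1) = pvIdxs t m s := by
  induction t generalizing s with
  | nil => simp [pvIdxs, pvIdxs2, PySem.List.enumerate_nil]
  | cons x r ih => rw [pvIdxs2_cons, pvIdxs_cons, ih]

theorem pvIdxs_length (day : List Int) (m : Int) (s : Int) :
    (pvIdxs day m s).length = day.count m := by
  induction day generalizing s with
  | nil => simp [pvIdxs, PySem.List.enumerate_nil]
  | cons x t ih =>
    rw [pvIdxs_cons]
    by_cases h : x = m <;> simp [h, ih]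

theorem pvIdxs_head (day : List Int) (m : Int) (s : Int) (h : m ∈ day) :
    (pvIdxs day m s).head? = some (s + (day.idxOf m : Int) + 1) := by
  induction day generalizing s with
  | nil => simp at h
  | cons x t ih =>
    rw [pvIdxs_cons]
    by_cases hx : x = m
    · simp [hx, List.idxOf_cons_self]
    · have hm : m ∈ t := by
        rcases List.mem_cons.mp h with h' | h'
        · exact absurd h'.symm hx
        · exact h'
      have hio : (x :: t).idxOf m = t.idxOf m + 1 := by
        simp [hx]
      simp [hx, ih (s + 1) hm, hio]
      ring

theorem pv_idxOf?_of_mem (l : List Int) (v : Int) (h : v ∈ l) :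
    List.idxOf? v l = some (l.idxOf v) := by
  induction l with
  | nil => simp at h
  | cons x t ih =>
    by_cases hx : x = v
    · simp [hx, List.idxOf?_cons]
    · have hv : v ∈ t := by
        rcases List.mem_cons.mp h with h' | h'
        · exact absurd h'.symm hx
        · exact h'
      simp [List.idxOf?_cons, hx, ih hv]

theorem pv_chars_join_nil_cons (a : List Char) (r : List (List Char)) :
    PySem.Chars.join [] (a :: r) = a ++ PySem.Chars.join [] r := by
  cases r with
  | nil => simp [PySem.Chars.join_singleton, PySem.Chars.join_nil]
  | cons q rest => rw [PySem.Chars.join_cons_cons]; simp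

theorem pv_str_join_nil_cons (a : String) (r : List String) :
    PySem.Str.join "" (a :: r) = a ++ PySem.Str.join "" r := by
  simp [PySem.Str.join, pv_chars_join_nil_cons]

theorem pv_fold_join (ps : List (Int × Int)) (m : Int) (acc : String) :
    ps.foldl (fun out p =>
        if p.2 == m then out ++ PySem.Int.toStr (p.1 + 1) ++ ", " else out) acc
      = acc ++ PySem.Str.join ""
          ((ps.filterMap (fun p => if p.2 == m then some (p.1 + 1) else none)).map
            (fun n => PySem.Int.toStr n ++ ", ")) := by
  induction ps generalizing acc with
  | nil => simp [PySem.Str.join]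
  | cons p t ih =>
    simp only [List.foldl_cons, List.filterMap_cons]
    by_cases h : p.2 = m
    · simp only [h, BEq.rfl, if_pos]
      rw [ih, List.map_cons, pv_str_join_nil_cons]
      simp [String.append_assoc]
    · have hb : (p.2 == m) = false := by simp [h]
      simp only [hb, Bool.false_eq_true, if_false]
      exact ih acc

-- the single-pass invariant: running over `enumerate t s` from state (b, acc) yields the
-- maximum of b and t, together with the kept positions
theorem pv_run_spec (t : List Int) (s b : Int) (acc : List Int) :
    (PySem.List.enumerate t s).foldl pvStep (b, acc)
      = (t.foldl max b,
         (if t.foldl max b = b then acc else []) ++ pvIdxs2 t (t.foldl max b) s) := by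
  induction t generalizing s b acc with
  | nil => simp [PySem.List.enumerate_nil, pvIdxs2]
  | cons x r ih =>
    rw [PySem.List.enumerate_cons, List.foldl_cons]
    have hmax : (x :: r).foldl max b = r.foldl max (max b x) := rfl
    rcases lt_trichotomy b x with hbx | hbx | hbx
    · -- strictly larger: reset
      have hstep : pvStep (b, acc) (s, x) = (x, [s]) := by
        simp [pvStep, hbx]
      rw [hstep, ih]
      have hM : max b x = x := max_eq_right hbx.le
      have hle : x ≤ r.foldl max x := (PySem.List.le_foldl_max r x).1
      rw [hmax, hM, pvIdxs2_cons]
      by_cases hMx : r.foldl max x = x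
      · simp [hMx]
        exact fun h => absurd h (by omega)
      · have hxne : ¬ x = r.foldl max x := fun h => hMx h.symm
        simp [hMx, hxne]
        exact fun h => absurd h (by omega)
    · -- equal: extend
      subst hbx
      have hstep : pvStep (b, acc) (s, b) = (b, acc ++ [s]) := by
        simp [pvStep]
      rw [hstep, ih]
      have hM : max b b = b := max_self b
      have hle : b ≤ r.foldl max b := (PySem.List.le_foldl_max r b).1
      rw [hmax, hM, pvIdxs2_cons]
      by_cases hMb : r.foldl max b = b
      · simp [hMb]
      · have hbne : ¬ b = r.foldl max b := fun h => hMb h.symm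
        simp [hMb, hbne]
    · -- smaller: keep state
      have hstep : pvStep (b, acc) (s, x) = (b, acc) := by
        have h1 : ¬ b < x := not_lt.mpr hbx.le
        have h2 : (x == b) = false := by simp [ne_of_lt hbx]
        simp [pvStep, h1, h2]
      rw [hstep, ih]
      have hM : max b x = b := max_eq_left hbx.le
      have hle : b ≤ r.foldl max b := (PySem.List.le_foldl_max r b).1
      have hxlt : x < r.foldl max b := lt_of_lt_of_le hbx hle
      rw [hmax, hM, pvIdxs2_cons]
      have hxne : ¬ x = r.foldl max b := ne_of_lt hxlt
      simp [hxne]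

-- ===== VERDICT (by name: the statement is the Claim_ definition above) =====
theorem getMaxDays_spec : Claim_equal_getMaxDays := by
  intro day _ hpre
  unfold Spec_getMaxDays
  cases day with
  | nil => exact absurd rfl hpre
  | cons x t =>
  have hmx : PySem.List.max? (x :: t) (fun y => y) = some (t.foldl max x) :=
    PySem.List.max?_id_cons x t
  set m := t.foldl max x with hm
  have hmem : m ∈ (x :: t) := PySem.List.max?_mem hmx
  -- B reduces to the formatted pvIdxs of the whole list
  have hrun := pv_run_spec t 2 x [1]
  have hidxsB : ((PySem.List.enumerate t 2).foldl pvStep (x, [1])).2 = pvIdxs (x :: t) m 0 := by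
    rw [hrun]
    have h2 : pvIdxs2 t m 2 = pvIdxs t m 1 := by
      have := pvIdxs2_shift t m 1
      norm_num at this ⊢
      exact this
    rw [pvIdxs_cons, ← hm, h2]
    by_cases hxm : m = x
    · simp [hxm]
    · have hx : ¬ x = m := fun h => hxm h.symm
      simp [hxm, hx]
  have hbestB : ((PySem.List.enumerate t 2).foldl pvStep (x, [1])).1 = m := by
    rw [hrun]
  unfold getMaxDays getMaxDays_alt
  rw [hmx]
  simp only
  rw [hidxsB, hbestB]
  have hlen : (pvIdxs (x :: t) m 0).length = (x :: t).count m := pvIdxs_length (x :: t) m 0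
  by_cases hc : (x :: t).count m = 1
  · -- unique maximum: both take the "Day" branch
    have hb : ((pvIdxs (x :: t) m 0).length == 1) = true := by simp [hlen, hc]
    have hhead : (pvIdxs (x :: t) m 0).head? = some (((x :: t).idxOf m : Int) + 1) := by
      simpa using pvIdxs_head (x :: t) m 0 hmem
    have hidx : PySem.List.index? (x :: t) m = some ((x :: t).idxOf m) := by
      rw [PySem.List.index?_eq_idxOf?]
      exact pv_idxOf?_of_mem (x :: t) m hmem
    rw [if_pos (by simpa using hc), if_pos hb]
    have hhd : (pvIdxs (x :: t) m 0).headD 0 = ((x :: t).idxOf m : Int) + 1 := by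
      simp [List.headD_eq_head?_getD, hhead]
    rw [hhd, hidx]
    simp
  · -- repeated maximum: both take the "Days" branch
    have hb : ((pvIdxs (x :: t) m 0).length == 1) = false := by simp [hlen, hc]
    rw [if_neg (by simpa using hc), if_neg (by simp [hb])]
    have hfold :
        (PySem.List.pyRange 0 (PySem.List.len (x :: t)) 1).foldl
          (fun out i =>
            if PySem.List.pyGetD (x :: t) i 0 == m then
              out ++ PySem.Int.toStr (i + 1) ++ ", "
            else out) ""
        = (PySem.List.enumerate (x :: t) 0).foldl
            (fun out p =>
              if p.2 == m then out ++ PySem.Int.toStr (p.1 + 1) ++ ", " else out) "" := by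
      rw [PySem.List.enumerate_eq_map_pyRange (x :: t) (0 : Int), List.foldl_map]
    rw [hfold, pv_fold_join]
    simp [pvIdxs]
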